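-- pv_equiv track=rewrite | github.com/hub-gif/market-assistant | backend/pipeline/csv/header_rewrite.py | _row_with_canonical_keys
-- ===== SOURCE A (Python) =====
-- def _normalize_field_key(k: str | None) -> str:
--     return (k or "").strip().lstrip("\ufeff")
--
-- def _row_with_canonical_keys(
--     row: dict[str, str],
--     legacy_map: dict[str, str],
-- ) -> dict[str, str]:
--     """将一行从任意旧表头映射为 canonical 列名；同列多旧键时取非空优先。"""
--     out: dict[str, str] = {}
--     for raw_k, v in row.items():
--         k = _normalize_field_key(raw_k)
--         if not k:
--             continue
--         nk = legacy_map.get(k, k)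
--         sv = "" if v is None else str(v)
--         if nk not in out or (sv.strip() and not str(out.get(nk, "")).strip()):
--             out[nk] = sv
--     return out
-- ===== SOURCE B (Python) =====
-- def _normalize_field_key(k):
--     return (k or "").strip().lstrip("\ufeff")
--
--
-- def _row_with_canonical_keys(row, legacy_map):
--     """Group values per canonical key, then reduce each group to the
--     first non-blank value (falling back to the group's first value)."""
--     groups = {}
--     for raw_k, v in row.items():
--         k = _normalize_field_key(raw_k)
--         if not k:
--             continue
--         nk = legacy_map.get(k, k)
--         sv = "" if v is None else str(v)
--         groups.setdefault(nk, []).append(sv)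
--     return {
--         nk: next((v for v in vals if v.strip()), vals[0])
--         for nk, vals in groups.items()
--     }
-- ===== Notes on version B (the rewrite author's own statement) =====
-- stated objective: alternative
-- what changed: Replaces A's single-pass conditional-overwrite dict with a two-pass group-then-reduce: first collect all values per canonical key in order, then pick each key's first non-blank value (else its first value).
import Mathlib
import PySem

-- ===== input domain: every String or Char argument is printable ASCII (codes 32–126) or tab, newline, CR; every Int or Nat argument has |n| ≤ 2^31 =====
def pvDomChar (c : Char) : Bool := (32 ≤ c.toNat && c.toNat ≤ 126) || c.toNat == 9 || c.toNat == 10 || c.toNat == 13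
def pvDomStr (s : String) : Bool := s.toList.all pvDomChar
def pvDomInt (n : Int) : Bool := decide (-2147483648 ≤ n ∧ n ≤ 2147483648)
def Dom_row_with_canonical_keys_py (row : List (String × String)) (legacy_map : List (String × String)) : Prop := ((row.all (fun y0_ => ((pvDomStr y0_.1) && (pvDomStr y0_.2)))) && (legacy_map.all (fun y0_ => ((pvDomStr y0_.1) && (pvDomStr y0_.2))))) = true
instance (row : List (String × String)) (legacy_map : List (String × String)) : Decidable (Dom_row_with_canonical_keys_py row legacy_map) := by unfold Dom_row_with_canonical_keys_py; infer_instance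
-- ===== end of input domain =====

-- B replaces A's single-pass conditional-overwrite dict with a two-pass
-- group-then-reduce (collect all values per canonical key, then pick the
-- first non-blank value, else the first value) — alternative decomposition.

-- ===== PORT A =====
-- _normalize_field_key: (k or "").strip().lstrip("\ufeff").
-- k is a str here, so `k or ""` is `k`; lstrip("\ufeff") drops leading U+FEFF chars (hand-ported, exact).
def normalize_field_key_py (k : String) : String :=
  String.ofList (((PySem.Str.strip k).toList).dropWhile (fun c => c == '\ufeff'))

def row_with_canonical_keys_py (row : List (String × String)) (legacy_map : List (String × String)) : List (String × String) :=
  (row.foldl (fun (out : PySem.Dict String String) p =>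
      let k := normalize_field_key_py p.1
      if k = "" then out
      else
        let nk := (PySem.Dict.mk legacy_map).getD k k
        let sv := p.2   -- v is a str, so `"" if v is None else str(v)` is v
        if out.contains nk = false ∨ (PySem.Str.strip sv ≠ "" ∧ PySem.Str.strip (out.getD nk "") = "")
        then out.insert nk sv else out)
    PySem.Dict.empty).items

-- ===== PORT B =====
-- next((v for v in vals if v.strip()), vals[0]); vals is never empty where B uses it,
-- so `vals.headD ""` is exact for `vals[0]`.
def pick_first_nonblank (vals : List String) : String :=
  (vals.find? (fun v => PySem.Str.strip v != "")).getD (vals.headD "")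

def row_with_canonical_keys_py_alt (row : List (String × String)) (legacy_map : List (String × String)) : List (String × String) :=
  let groups := row.foldl (fun (g : PySem.Dict String (List String)) p =>
      let k := normalize_field_key_py p.1
      if k = "" then g
      else
        let nk := (PySem.Dict.mk legacy_map).getD k k
        let sv := p.2
        g.modify nk [] (· ++ [sv]))    -- groups.setdefault(nk, []).append(sv)
    PySem.Dict.empty
  groups.items.map (fun q => (q.1, pick_first_nonblank q.2))

-- ===== PRECONDITION & SPEC =====
def Spec_row_with_canonical_keys_py (row : List (String × String)) (legacy_map : List (String × String)) (out : List (String × String)) : Prop := out = row_with_canonical_keys_py_alt row legacy_map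
instance (row : List (String × String)) (legacy_map : List (String × String)) (out : List (String × String)) : Decidable (Spec_row_with_canonical_keys_py row legacy_map out) := by unfold Spec_row_with_canonical_keys_py; infer_instance

-- ===== CLAIM (what is proved, stated in full; the proofs are below) =====
def Claim_equal_row_with_canonical_keys_py : Prop := ∀ (row : List (String × String)) (legacy_map : List (String × String)), Dom_row_with_canonical_keys_py row legacy_map → Spec_row_with_canonical_keys_py row legacy_map (row_with_canonical_keys_py row legacy_map)

-- ===== LEMMAS AND PROOFS =====

-- toA g : the String-valued dict A would hold when B holds the group dict g
def toA (g : PySem.Dict String (List String)) : PySem.Dict String String :=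
  PySem.Dict.mk (g.items.map (fun q => (q.1, pick_first_nonblank q.2)))

theorem get?_mk_map (l : List (String × List String)) (k : String) :
    (PySem.Dict.mk (l.map (fun q => (q.1, pick_first_nonblank q.2)))).get? k
      = ((PySem.Dict.mk l).get? k).map pick_first_nonblank := by
  induction l with
  | nil => rfl
  | cons p rest ih =>
    rw [List.map_cons, PySem.Dict.get?_mk_cons, PySem.Dict.get?_mk_cons]
    by_cases h : p.1 == k <;> simp [h, ih]

theorem get?_toA (g : PySem.Dict String (List String)) (k : String) :
    (toA g).get? k = (g.get? k).map pick_first_nonblank := by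
  obtain ⟨l⟩ := g
  exact get?_mk_map l k

theorem keys_toA (g : PySem.Dict String (List String)) : (toA g).keys = g.keys := by
  simp [toA, PySem.Dict.keys]

theorem contains_toA (g : PySem.Dict String (List String)) (k : String) :
    (toA g).contains k = g.contains k := by
  rw [PySem.Dict.contains_eq_isSome_get?, PySem.Dict.contains_eq_isSome_get?, get?_toA]
  cases g.get? k <;> rfl

theorem pick_single (sv : String) : pick_first_nonblank [sv] = sv := by
  simp only [pick_first_nonblank]
  cases hf : List.find? (fun v => PySem.Str.strip v != "") [sv] with
  | some w =>
    have hm := List.mem_of_find?_eq_some hf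
    simp only [List.mem_singleton] at hm
    simp [hm]
  | none => simp

theorem pick_mem (vs : List String) (h : vs ≠ []) : pick_first_nonblank vs ∈ vs := by
  simp only [pick_first_nonblank]
  cases hf : vs.find? (fun v => PySem.Str.strip v != "") with
  | some w => simpa using List.mem_of_find?_eq_some hf
  | none => cases vs with
    | nil => exact absurd rfl h
    | cons a l => simp

theorem pick_append (vs : List String) (sv : String) (h : vs ≠ []) :
    pick_first_nonblank (vs ++ [sv]) =
      if PySem.Str.strip sv ≠ "" ∧ PySem.Str.strip (pick_first_nonblank vs) = "" then sv
      else pick_first_nonblank vs := by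
  cases hf : vs.find? (fun v => PySem.Str.strip v != "") with
  | some w =>
    have hw : PySem.Str.strip w ≠ "" := by
      have := List.find?_some hf
      simpa using this
    have hp : pick_first_nonblank vs = w := by simp [pick_first_nonblank, hf]
    simp only [pick_first_nonblank, List.find?_append, hf]
    simp [hw]
  | none =>
    have hall : ∀ v ∈ vs, PySem.Str.strip v = "" := by
      intro v hv
      have := List.find?_eq_none.mp hf v hv
      simpa using this
    have hp : PySem.Str.strip (pick_first_nonblank vs) = "" :=
      hall _ (pick_mem vs h)
    by_cases hs : PySem.Str.strip sv = ""
    · have : (vs ++ [sv]).find? (fun v => PySem.Str.strip v != "") = none := by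
        rw [List.find?_append, hf]
        simp [hs]
      simp only [pick_first_nonblank, this, hf, Option.getD_none]
      cases vs with
      | nil => exact absurd rfl h
      | cons a l => simp [hs]
    · have hfind : (vs ++ [sv]).find? (fun v => PySem.Str.strip v != "") = some sv := by
        rw [List.find?_append, hf]
        simp [hs]
      rw [if_pos ⟨hs, hp⟩]
      simp [pick_first_nonblank, hfind]

theorem items_toA (g : PySem.Dict String (List String)) :
    (toA g).items = g.items.map (fun q => (q.1, pick_first_nonblank q.2)) := rfl

theorem toA_insert (g : PySem.Dict String (List String)) (nk : String) (vs' : List String) :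
    (toA g).insert nk (pick_first_nonblank vs') = toA (g.insert nk vs') := by
  apply PySem.Dict.ext
  rw [items_toA, PySem.Dict.items_insert, PySem.Dict.items_insert, contains_toA, items_toA]
  by_cases hc : g.contains nk = true
  · rw [if_pos hc, if_pos hc, List.map_map, List.map_map]
    apply List.map_congr_left
    intro q _
    by_cases hq : q.1 == nk <;> simp [hq, Function.comp]
  · rw [if_neg hc, if_neg hc, List.map_append]
    rfl

theorem insert_self_eq (d : PySem.Dict String String) (k : String) (v : String)
    (hnd : d.keys.Nodup) (hg : d.get? k = some v) : d.insert k v = d := by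
  apply PySem.Dict.ext
  rw [PySem.Dict.items_insert_of_contains d v (by rw [PySem.Dict.contains_eq_isSome_get?, hg]; rfl)]
  conv_rhs => rw [← List.map_id d.items]
  apply List.map_congr_left
  rintro ⟨qk, qv⟩ hq
  by_cases hqk : qk == k
  · have hk : qk = k := by simpa using hqk
    have h2 : d.get? qk = some qv := PySem.Dict.get?_of_mem_items d hq hnd
    rw [hk, hg] at h2
    simp_all
  · simp [hqk]

-- The step invariant: A's fold from toA g tracks B's fold from g.
theorem fold_invariant (row : List (String × String)) (legacy_map : List (String × String))
    (g : PySem.Dict String (List String))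
    (hnd : g.keys.Nodup) (hne : ∀ p ∈ g.items, p.2 ≠ []) :
    row.foldl (fun (out : PySem.Dict String String) p =>
      let k := normalize_field_key_py p.1
      if k = "" then out
      else
        let nk := (PySem.Dict.mk legacy_map).getD k k
        let sv := p.2
        if out.contains nk = false ∨ (PySem.Str.strip sv ≠ "" ∧ PySem.Str.strip (out.getD nk "") = "")
        then out.insert nk sv else out) (toA g)
    = toA (row.foldl (fun (g : PySem.Dict String (List String)) p =>
      let k := normalize_field_key_py p.1
      if k = "" then g
      else
        let nk := (PySem.Dict.mk legacy_map).getD k k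
        let sv := p.2
        g.modify nk [] (· ++ [sv])) g) := by
  induction row generalizing g with
  | nil => rfl
  | cons p rest ih =>
    simp only [List.foldl_cons]
    by_cases hk : normalize_field_key_py p.1 = ""
    · simp only [hk]
      exact ih g hnd hne
    · simp only [if_neg hk]
      set nk := (PySem.Dict.mk legacy_map).getD (normalize_field_key_py p.1) (normalize_field_key_py p.1) with hnk
      set sv := p.2 with hsv
      have hmod : g.modify nk [] (· ++ [sv]) = g.insert nk (g.getD nk [] ++ [sv]) := rfl
      have hnd' : (g.insert nk (g.getD nk [] ++ [sv])).keys.Nodup :=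
        PySem.Dict.nodup_keys_insert _ _ _ hnd
      have hne' : ∀ q ∈ (g.insert nk (g.getD nk [] ++ [sv])).items, q.2 ≠ [] := by
        intro q hq
        rcases (PySem.Dict.mem_items_insert _ _ _ _).mp hq with h | ⟨h, _⟩
        · subst h; simp
        · exact hne q h
      rw [hmod]
      by_cases hc : g.contains nk = true
      · -- key already present; let vs be the stored group
        obtain ⟨vs, hvs⟩ : ∃ vs, g.get? nk = some vs := by
          rw [PySem.Dict.contains_eq_isSome_get?] at hc
          exact Option.isSome_iff_exists.mp hc
        have hvsne : vs ≠ [] := hne (nk, vs) (PySem.Dict.mem_items_of_get?_eq_some g hvs)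
        have hgetD : g.getD nk [] = vs := PySem.Dict.getD_of_get?_eq_some g [] hvs
        have hAget : (toA g).getD nk "" = pick_first_nonblank vs := by
          rw [PySem.Dict.getD_eq_get?_getD, get?_toA, hvs]; rfl
        have hAc : (toA g).contains nk = true := by rw [contains_toA]; exact hc
        by_cases hcond : PySem.Str.strip sv ≠ "" ∧ PySem.Str.strip (pick_first_nonblank vs) = ""
        · -- A replaces; B's appended group picks sv
          have : ((toA g).contains nk = false ∨ (PySem.Str.strip sv ≠ "" ∧ PySem.Str.strip ((toA g).getD nk "") = "")) := by
            rw [hAget]; exact Or.inr hcond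
          rw [if_pos this]
          have hpick : pick_first_nonblank (vs ++ [sv]) = sv := by
            rw [pick_append vs sv hvsne, if_pos hcond]
          have key : (toA g).insert nk sv = toA (g.insert nk (vs ++ [sv])) := by
            rw [← toA_insert g nk (vs ++ [sv]), hpick]
          rw [hgetD, key]
          exact ih _ (by rw [← hgetD]; exact hnd') (by rw [← hgetD]; exact hne')
        · -- A keeps; B's appended group still picks the same value
          have : ¬ ((toA g).contains nk = false ∨ (PySem.Str.strip sv ≠ "" ∧ PySem.Str.strip ((toA g).getD nk "") = "")) := by
            rw [hAget, hAc]; simp only [Bool.true_eq_false, false_or]; exact hcond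
          rw [if_neg this]
          have hpick : pick_first_nonblank (vs ++ [sv]) = pick_first_nonblank vs := by
            rw [pick_append vs sv hvsne, if_neg hcond]
          have hsame : toA g = toA (g.insert nk (g.getD nk [] ++ [sv])) := by
            rw [hgetD, ← toA_insert, hpick]
            rw [insert_self_eq]
            · rw [keys_toA]; exact hnd
            · rw [get?_toA, hvs]; rfl
          rw [hsame]
          exact ih _ hnd' hne'
      · -- fresh key: A inserts sv, B starts the group [sv]
        have hc' : g.contains nk = false := by simpa using hc
        have hAc : (toA g).contains nk = false := by rw [contains_toA]; exact hc'
        rw [if_pos (Or.inl hAc)]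
        have hgetD : g.getD nk [] = [] := PySem.Dict.getD_of_not_contains g [] hc'
        have : (toA g).insert nk sv = toA (g.insert nk (g.getD nk [] ++ [sv])) := by
          rw [hgetD, List.nil_append, ← toA_insert, pick_single]
        rw [this]
        exact ih _ hnd' hne'

-- ===== VERDICT (by name: the statement is the Claim_ definition above) =====
theorem row_with_canonical_keys_py_spec : Claim_equal_row_with_canonical_keys_py := by
  intro row legacy_map _
  unfold Spec_row_with_canonical_keys_py row_with_canonical_keys_py row_with_canonical_keys_py_alt
  have h := fold_invariant row legacy_map PySem.Dict.empty
    (by simp [PySem.Dict.keys_empty]) (by intro p hp; simp [PySem.Dict.empty] at hp)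
  have hempty : toA PySem.Dict.empty = PySem.Dict.empty := rfl
  rw [hempty] at h
  rw [h]
  rfl
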